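-- pv_equiv track=rewrite | github.com/JoWatson2011/advent-of-code | aoc-2024/aoc-2024-day-8.py | get_forward_points
-- ===== SOURCE A (Python) =====
-- def get_forward_points(x2, y2, xd, yd, forward_points, boundary):
--     x3, y3 = x2 + xd, y2 + yd
--
--     if (boundary > x3 >= 0 and boundary > y3 >= 0):
--         coord = '{0},{1}'.format(x3, y3)
--
--         if coord not in forward_points:
--             forward_points.append(coord)
--         return get_forward_points(x3, y3, xd, yd, forward_points, boundary)
--     else:
--         return forward_points
-- ===== SOURCE B (Python) =====
-- def get_forward_points(x2, y2, xd, yd, forward_points, boundary):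
--     # Phase 1: walk the ray and collect every in-bounds point, in order.
--     ray = []
--     x, y = x2 + xd, y2 + yd
--     while 0 <= x < boundary and 0 <= y < boundary:
--         ray.append('{0},{1}'.format(x, y))
--         x, y = x + xd, y + yd
--     # Phase 2: append each collected point to forward_points unless already present.
--     for coord in ray:
--         if coord not in forward_points:
--             forward_points.append(coord)
--     return forward_points
-- ===== Notes on version B (the rewrite author's own statement) =====
-- stated objective: idiomatic
-- what changed: A's tail recursion that interleaves stepping with dedup-appending is replaced by two plain phases: an iterative while loop that first collects the whole in-bounds ray as a list, then a for loop that dedup-appends those coordinates into forward_points; Pre_ excludes only the inputs on which A raises RecursionError under the interpreter's 10000-frame recursion limit: the non-terminating xd=yd=0 case with an in-bounds first step, and walks of more than 9900 steps (the cutoff 9900 sits at that limit, leaving a few dozen frames of slack for the call context).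
-- outside the precondition, e.g. on get_forward_points(0, 0, 0, 0, [], 5): A raises RecursionError, B does not finish within the time limit; on get_forward_points(0, 0, 1, 1, [], 20000): A raises RecursionError
import Mathlib
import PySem

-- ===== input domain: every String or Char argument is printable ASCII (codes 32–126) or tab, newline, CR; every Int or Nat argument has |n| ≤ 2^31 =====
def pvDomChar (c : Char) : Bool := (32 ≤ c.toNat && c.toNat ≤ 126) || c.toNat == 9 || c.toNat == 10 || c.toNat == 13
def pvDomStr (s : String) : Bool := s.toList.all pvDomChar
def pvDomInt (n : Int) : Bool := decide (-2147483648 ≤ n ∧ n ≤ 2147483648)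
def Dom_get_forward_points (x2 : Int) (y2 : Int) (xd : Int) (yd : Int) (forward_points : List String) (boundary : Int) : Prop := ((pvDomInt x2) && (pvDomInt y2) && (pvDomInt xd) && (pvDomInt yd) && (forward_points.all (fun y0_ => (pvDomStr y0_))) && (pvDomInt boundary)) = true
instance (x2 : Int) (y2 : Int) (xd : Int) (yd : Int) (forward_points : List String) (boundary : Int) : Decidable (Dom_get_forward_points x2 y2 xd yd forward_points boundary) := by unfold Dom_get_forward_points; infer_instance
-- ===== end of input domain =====

-- B replaces A's tail recursion (step, dedup-append, recurse) by two plain phases — collect the whole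
-- in-bounds ray iteratively, then dedup-append it — same return value; both A and B extend the passed-in
-- list in place in Python, and the equivalence proved here is about the return value.

-- '{0},{1}'.format(x, y) — both versions build coordinates this way
def pvCoord (x y : Int) : String := PySem.Int.toStr x ++ "," ++ PySem.Int.toStr y

-- fuel bound making the ports total: a walk that stays in [0, boundary) with a nonzero step takes at
-- most boundary steps, so boundary.toNat + 1 calls are never exhausted on inputs Pre_ admits
def pvFuel (boundary : Int) : Nat := boundary.toNat + 1

-- ===== PORT A =====
def pvGoA (fuel : Nat) (x2 y2 xd yd : Int) (forward_points : List String) (boundary : Int) : List String :=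
  match fuel with
  | 0 => forward_points
  | Nat.succ fuel =>
    let x3 := x2 + xd
    let y3 := y2 + yd
    if boundary > x3 ∧ x3 ≥ 0 ∧ boundary > y3 ∧ y3 ≥ 0 then
      let coord := pvCoord x3 y3
      let fp' := if coord ∈ forward_points then forward_points else forward_points ++ [coord]
      pvGoA fuel x3 y3 xd yd fp' boundary
    else forward_points

def get_forward_points (x2 : Int) (y2 : Int) (xd : Int) (yd : Int) (forward_points : List String) (boundary : Int) : List String :=
  pvGoA (pvFuel boundary) x2 y2 xd yd forward_points boundary

-- ===== PORT B =====
-- phase 1: the while loop collecting the in-bounds ray, as the obvious structural recursion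
def pvRay (fuel : Nat) (x y xd yd boundary : Int) : List String :=
  match fuel with
  | 0 => []
  | Nat.succ fuel =>
    if 0 ≤ x ∧ x < boundary ∧ 0 ≤ y ∧ y < boundary then
      pvCoord x y :: pvRay fuel (x + xd) (y + yd) xd yd boundary
    else []

-- phase 2 body: append coord unless already present
def pvDedupAppend (acc : List String) (coord : String) : List String :=
  if coord ∈ acc then acc else acc ++ [coord]

def get_forward_points_alt (x2 : Int) (y2 : Int) (xd : Int) (yd : Int) (forward_points : List String) (boundary : Int) : List String :=
  (pvRay (pvFuel boundary) (x2 + xd) (y2 + yd) xd yd boundary).foldl pvDedupAppend forward_points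

-- ===== PRECONDITION & SPEC =====
-- remaining in-bounds steps available in one coordinate (d ≠ 0, first step already in bounds)
def pvLim (b d s : Int) : Int :=
  if 0 < d then PySem.Int.floordiv (b - 1 - s) d else PySem.Int.floordiv s (-d)

-- Pre_ excludes exactly the inputs on which Python A raises RecursionError instead of returning under
-- the interpreter's 10000-frame recursion limit: the non-terminating xd = yd = 0 case with an in-bounds
-- first step, and walks whose recursion depth exceeds that limit; the 9900-step cutoff sits at the
-- limit itself, keeping only a few dozen frames of slack for the surrounding call context.
def Pre_get_forward_points (x2 : Int) (y2 : Int) (xd : Int) (yd : Int) (forward_points : List String) (boundary : Int) : Prop :=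
  (0 ≤ x2 + xd ∧ x2 + xd < boundary ∧ 0 ≤ y2 + yd ∧ y2 + yd < boundary) →
    ((xd ≠ 0 ∧ pvLim boundary xd (x2 + xd) ≤ 9900) ∨ (yd ≠ 0 ∧ pvLim boundary yd (y2 + yd) ≤ 9900))
instance (x2 : Int) (y2 : Int) (xd : Int) (yd : Int) (forward_points : List String) (boundary : Int) : Decidable (Pre_get_forward_points x2 y2 xd yd forward_points boundary) := by unfold Pre_get_forward_points; infer_instance

def pvWitness_get_forward_points : Int × Int × Int × Int × List String × Int := (0, 0, 1, 1, ["0,0"], 5)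

def Spec_get_forward_points (x2 : Int) (y2 : Int) (xd : Int) (yd : Int) (forward_points : List String) (boundary : Int) (out : List String) : Prop := out = get_forward_points_alt x2 y2 xd yd forward_points boundary
instance (x2 : Int) (y2 : Int) (xd : Int) (yd : Int) (forward_points : List String) (boundary : Int) (out : List String) : Decidable (Spec_get_forward_points x2 y2 xd yd forward_points boundary out) := by unfold Spec_get_forward_points; infer_instance

-- ===== CLAIM (what is proved, stated in full; the proofs are below) =====
def Claim_equal_get_forward_points : Prop := ∀ (x2 : Int) (y2 : Int) (xd : Int) (yd : Int) (forward_points : List String) (boundary : Int), Dom_get_forward_points x2 y2 xd yd forward_points boundary → Pre_get_forward_points x2 y2 xd yd forward_points boundary → Spec_get_forward_points x2 y2 xd yd forward_points boundary (get_forward_points x2 y2 xd yd forward_points boundary)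

-- ===== LEMMAS AND PROOFS =====
-- For EVERY fuel and state, A's interleaved recursion equals B's fold of the generated ray: the two
-- ports consume their fuel in lockstep, so the claim follows for the common fuel pvFuel boundary.
theorem pvGoA_eq_foldl_ray (fuel : Nat) :
    ∀ (x y xd yd : Int) (fp : List String) (b : Int),
      pvGoA fuel x y xd yd fp b = (pvRay fuel (x + xd) (y + yd) xd yd b).foldl pvDedupAppend fp := by
  induction fuel with
  | zero => intro x y xd yd fp b; simp [pvGoA, pvRay]
  | succ n ih =>
    intro x y xd yd fp b
    by_cases h : b > x + xd ∧ x + xd ≥ 0 ∧ b > y + yd ∧ y + yd ≥ 0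
    · have h' : 0 ≤ x + xd ∧ x + xd < b ∧ 0 ≤ y + yd ∧ y + yd < b := by omega
      simp only [pvGoA, pvRay, if_pos h, if_pos h', List.foldl_cons]
      rw [ih]
      rfl
    · have h' : ¬(0 ≤ x + xd ∧ x + xd < b ∧ 0 ≤ y + yd ∧ y + yd < b) := by omega
      simp [pvGoA, pvRay, if_neg h, if_neg h']

-- ===== VERDICT (by name: the statement is the Claim_ definition above) =====
theorem get_forward_points_spec : Claim_equal_get_forward_points := by
  intro x2 y2 xd yd forward_points boundary _ _
  unfold Spec_get_forward_points get_forward_points get_forward_points_alt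
  exact pvGoA_eq_foldl_ray (pvFuel boundary) x2 y2 xd yd forward_points boundary
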